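-- pv_equiv track=rewrite | github.com/hwavesong/m3u8_To_MP4 | m3u8_To_MP4/helpers/path_helper.py | calibrate_mp4_file_name
-- ===== SOURCE A (Python) =====
-- def calibrate_mp4_file_name(mp4_file_name):
--     if mp4_file_name.strip() == '':
--         return False, None
--
--     banned_ls = ['\\', '/', ':', '*', '?', '"', '<', '>', '|']
--
--     for ch in banned_ls:
--         mp4_file_name = mp4_file_name.replace(ch, '')
--
--     if not mp4_file_name.endswith('.mp4'):
--         mp4_file_name += '.mp4'
--
--     return True, mp4_file_name
-- ===== SOURCE B (Python) =====
-- def calibrate_mp4_file_name(mp4_file_name):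
--     if mp4_file_name.strip() == '':
--         return False, None
--
--     banned = {'\\', '/', ':', '*', '?', '"', '<', '>', '|'}
--     cleaned = ''.join(ch for ch in mp4_file_name if ch not in banned)
--
--     if cleaned.endswith('.mp4'):
--         return True, cleaned
--     return True, cleaned + '.mp4'
-- ===== Notes on version B (the rewrite author's own statement) =====
-- stated objective: idiomatic
-- what changed: Replaces the nine sequential whole-string replace() scans with a single pass over the input's characters filtering against a set of banned characters.
import Mathlib
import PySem

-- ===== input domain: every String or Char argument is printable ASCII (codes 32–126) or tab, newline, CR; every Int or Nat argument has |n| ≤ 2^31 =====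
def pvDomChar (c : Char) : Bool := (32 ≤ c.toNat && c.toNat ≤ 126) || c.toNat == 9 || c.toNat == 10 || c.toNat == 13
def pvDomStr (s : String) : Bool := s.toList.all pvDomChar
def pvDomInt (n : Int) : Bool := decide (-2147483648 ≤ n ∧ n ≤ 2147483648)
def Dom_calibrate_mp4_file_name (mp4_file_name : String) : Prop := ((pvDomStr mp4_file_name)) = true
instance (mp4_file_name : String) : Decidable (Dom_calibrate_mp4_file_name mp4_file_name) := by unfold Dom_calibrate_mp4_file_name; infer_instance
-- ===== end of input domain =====

-- B replaces A's nine whole-string replace() scans by one pass filtering against a set of banned characters (idiomatic; same result proved for all inputs in Dom).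

-- ===== PORT A =====
-- Python string concatenation 'mp4_file_name += ".mp4"' is ported exactly as
-- String.ofList of the concatenated char lists.
def calibrate_mp4_file_name (mp4_file_name : String) : Bool × Option String :=
  if PySem.Str.strip mp4_file_name == "" then (false, none)
  else
    let banned_ls : List String := ["\\", "/", ":", "*", "?", "\"", "<", ">", "|"]
    let t := banned_ls.foldl (fun acc ch => PySem.Str.replace acc ch "") mp4_file_name
    if !(PySem.Str.endswith t ".mp4") then
      (true, some (String.ofList (t.toList ++ ".mp4".toList)))
    else (true, some t)

-- ===== PORT B =====
-- ''.join of the filtered characters is ported exactly as String.ofList of the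
-- filtered char list; the Python set literal is PySem.Set.ofList.
def calibrate_mp4_file_name_alt (mp4_file_name : String) : Bool × Option String :=
  if PySem.Str.strip mp4_file_name == "" then (false, none)
  else
    let banned : PySem.Set Char := PySem.Set.ofList ['\\', '/', ':', '*', '?', '"', '<', '>', '|']
    let cleaned := mp4_file_name.toList.filter (fun c => !(PySem.Set.contains banned c))
    if PySem.Chars.endswith cleaned ".mp4".toList then (true, some (String.ofList cleaned))
    else (true, some (String.ofList (cleaned ++ ".mp4".toList)))

-- ===== PRECONDITION & SPEC =====
def Spec_calibrate_mp4_file_name (mp4_file_name : String) (out : Bool × Option String) : Prop := out = calibrate_mp4_file_name_alt mp4_file_name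
instance (mp4_file_name : String) (out : Bool × Option String) : Decidable (Spec_calibrate_mp4_file_name mp4_file_name out) := by unfold Spec_calibrate_mp4_file_name; infer_instance

-- ===== CLAIM (what is proved, stated in full; the proofs are below) =====
def Claim_equal_calibrate_mp4_file_name : Prop := ∀ (mp4_file_name : String), Dom_calibrate_mp4_file_name mp4_file_name → Spec_calibrate_mp4_file_name mp4_file_name (calibrate_mp4_file_name mp4_file_name)

-- ===== LEMMAS AND PROOFS =====

-- str.replace(s, c, '') for a single character c removes exactly the occurrences of c.
lemma pv_go_single (c : Char) (l acc : List Char) (fuel : Nat) (h : l.length ≤ fuel) :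
    PySem.Chars.replace.go [c] [] fuel l acc
      = acc.reverse ++ l.filter (fun x => !(x == c)) := by
  induction l generalizing fuel acc with
  | nil => cases fuel <;> simp [PySem.Chars.replace.go]
  | cons x t ih =>
    cases fuel with
    | zero => simp at h
    | succ n =>
      simp only [PySem.Chars.replace.go]
      by_cases hx : x = c
      · subst hx
        simp [List.isPrefixOf, ih _ _ (by simpa using h)]
      · simp [List.isPrefixOf, hx, Ne.symm hx, ih _ _ (by simpa using h)]

lemma pv_replace_single (c : Char) (l : List Char) :
    PySem.Chars.replace l [c] [] = l.filter (fun x => !(x == c)) := by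
  simpa using pv_go_single c l [] l.length le_rfl

-- the nine sequential single-character removals are one filter against the banned set
lemma pv_chain (l : List Char) :
    ((["\\", "/", ":", "*", "?", "\"", "<", ">", "|"] : List String).foldl
        (fun acc ch => PySem.Str.replace acc ch "") (String.ofList l))
      = String.ofList (l.filter (fun c =>
          !(PySem.Set.contains (PySem.Set.ofList ['\\', '/', ':', '*', '?', '"', '<', '>', '|']) c))) := by
  simp only [List.foldl_cons, List.foldl_nil, PySem.Str.replace, String.toList_ofList]
  congr 1
  simp only [show ("\\" : String).toList = ['\\'] from rfl, show ("/" : String).toList = ['/'] from rfl,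
    show (":" : String).toList = [':'] from rfl, show ("*" : String).toList = ['*'] from rfl,
    show ("?" : String).toList = ['?'] from rfl, show ("\"" : String).toList = ['"'] from rfl,
    show ("<" : String).toList = ['<'] from rfl, show (">" : String).toList = ['>'] from rfl,
    show ("|" : String).toList = ['|'] from rfl, show ("" : String).toList = [] from rfl,
    pv_replace_single, List.filter_filter]
  apply List.filter_congr
  intro x _
  rw [Bool.eq_iff_iff]
  simp [PySem.Set.contains, PySem.Set.ofList, List.mem_cons]
  tauto

-- ===== VERDICT (by name: the statement is the Claim_ definition above) =====
theorem calibrate_mp4_file_name_spec : Claim_equal_calibrate_mp4_file_name := by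
  intro s _
  unfold Spec_calibrate_mp4_file_name calibrate_mp4_file_name calibrate_mp4_file_name_alt
  by_cases hg : PySem.Str.strip s == ""
  · simp [hg]
  · have hstr := pv_chain s.toList
    rw [String.ofList_toList] at hstr
    rw [if_neg hg, if_neg hg]
    simp only []
    rw [hstr]
    set cleaned := s.toList.filter (fun c =>
      !(PySem.Set.contains (PySem.Set.ofList ['\\', '/', ':', '*', '?', '"', '<', '>', '|']) c)) with hc
    cases hE : PySem.Chars.endswith cleaned ['.', 'm', 'p', '4'] <;>
      simp [PySem.Str.endswith, hE]
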